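-- pv_equiv track=rewrite | github.com/HEEE23/programmers | 프로그래머스/2/132265. 롤케이크 자르기/롤케이크 자르기.py | solution
-- ===== SOURCE A (Python) =====
-- from collections import Counter
--
-- def solution(topping):
--     answer = 0
--
-- #     # 시간초과
-- #     for i in range(len(topping)):
-- #         t1 = set(topping[:i+1])
-- #         t2 = set(topping[i+1:])
--
-- #         if len(t1) == len(t2):
-- #             answer += 1
--
-- #         if len(t1) > len(t2):
-- #             break
--
--     dic = Counter(topping)
--     # 동생
--     set_dic = set()
--
--     for t in topping:
--         dic[t] -= 1
--         set_dic.add(t)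
--
--         if dic[t] == 0:
--             dic.pop(t)
--
--         if len(set_dic) == len(dic):
--             answer += 1
--
--     return answer
-- ===== SOURCE B (Python) =====
-- def solution(topping):
--     # suffix[i] = number of distinct toppings in topping[i:]; built right-to-left
--     suffix = [0]
--     seen = set()
--     for t in reversed(topping):
--         seen.add(t)
--         suffix.append(len(seen))
--     suffix.reverse()
--     answer = 0
--     prefix = set()
--     for t, right in zip(topping, suffix[1:]):
--         prefix.add(t)
--         if len(prefix) == right:
--             answer += 1
--     return answer
-- ===== Notes on version B (the rewrite author's own statement) =====
-- stated objective: alternative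
-- what changed: Instead of A's single pass that decrements a full Counter of the list (popping exhausted keys) while growing a prefix set, B precomputes a suffix-distinct table in a right-to-left pass with a seen-set and then scans left to right with a prefix set, comparing its size to the table entry.
import Mathlib
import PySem

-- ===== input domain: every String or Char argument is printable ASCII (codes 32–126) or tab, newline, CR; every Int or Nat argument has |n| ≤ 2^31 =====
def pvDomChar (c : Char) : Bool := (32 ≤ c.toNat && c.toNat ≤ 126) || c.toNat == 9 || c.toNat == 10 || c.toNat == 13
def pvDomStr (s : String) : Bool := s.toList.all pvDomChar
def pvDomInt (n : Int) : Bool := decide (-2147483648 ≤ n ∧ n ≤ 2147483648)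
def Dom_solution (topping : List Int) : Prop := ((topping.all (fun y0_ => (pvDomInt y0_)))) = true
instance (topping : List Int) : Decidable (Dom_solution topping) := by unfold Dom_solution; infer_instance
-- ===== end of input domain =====

-- B replaces A's decremented-Counter single pass by a precomputed suffix-distinct table plus a
-- prefix-set scan (alternative decomposition, same O(n) cost).

-- ===== PORT A =====
-- the loop body of A's single for-loop (state: answer, dic, set_dic)
def solutionBodyA (s : Int × PySem.Dict Int Int × PySem.Set Int) (t : Int) :
    Int × PySem.Dict Int Int × PySem.Set Int :=
  let answer := s.1
  let dic := s.2.1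
  let set_dic := s.2.2
  let dic := dic.modify t 0 (fun v => v - 1)          -- dic[t] -= 1  (Counter default 0)
  let set_dic := set_dic.add t                         -- set_dic.add(t)
  let dic := if dic.getD t 0 == 0 then dic.erase t else dic   -- if dic[t] == 0: dic.pop(t)
  let answer := if PySem.Set.len set_dic == (dic.size : Int) then answer + 1 else answer
  (answer, dic, set_dic)

def solution (topping : List Int) : Int :=
  let answer : Int := 0
  let dic := PySem.Dict.counter topping                -- Counter(topping)
  let set_dic : PySem.Set Int := PySem.Set.empty       -- set()
  (topping.foldl solutionBodyA (answer, dic, set_dic)).1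

-- ===== PORT B =====
-- 'for t in reversed(topping): seen.add(t); suffix.append(len(seen))' then 'suffix.reverse()'
-- builds the list front-to-back, i.e. a foldr consing onto the initial [0]
def solutionStepB (t : Int) (s : List Int × PySem.Set Int) : List Int × PySem.Set Int :=
  let seen := s.2.add t
  (PySem.Set.len seen :: s.1, seen)

-- the second loop's body (state: answer, prefix), iterating zip(topping, suffix[1:])
def solutionBodyB (s : Int × PySem.Set Int) (pr : Int × Int) : Int × PySem.Set Int :=
  let pre := s.2.add pr.1
  let answer := if PySem.Set.len pre == pr.2 then s.1 + 1 else s.1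
  (answer, pre)

def solution_alt (topping : List Int) : Int :=
  let suffix := (topping.foldr solutionStepB ([0], PySem.Set.empty)).1
  ((topping.zip (suffix.drop 1)).foldl solutionBodyB (0, PySem.Set.empty)).1

-- ===== PRECONDITION & SPEC =====
def Spec_solution (topping : List Int) (out : Int) : Prop := out = solution_alt topping
instance (topping : List Int) (out : Int) : Decidable (Spec_solution topping out) := by unfold Spec_solution; infer_instance

-- ===== CLAIM (what is proved, stated in full; the proofs are below) =====
def Claim_equal_solution : Prop := ∀ (topping : List Int), Dom_solution topping → Spec_solution topping (solution topping)

-- ===== LEMMAS AND PROOFS =====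

-- number of distinct elements of a list
def distinctN (l : List Int) : Nat := (PySem.List.dedup l).length

-- the common split-counting function both loops compute
def splitCount (st : PySem.Set Int) : List Int → Int
  | [] => 0
  | x :: xs => (if (st.add x).length = distinctN xs then 1 else 0) + splitCount (st.add x) xs

-- a Nodup list with the same members as l has length distinctN l
lemma len_eq_distinct {s l : List Int} (hn : s.Nodup) (hm : ∀ t, t ∈ s ↔ t ∈ l) :
    s.length = distinctN l := by
  have h1 : (PySem.List.dedup l).Nodup := by
    simpa [PySem.List.dedup] using PySem.Set.nodup_ofList (xs := l)
  have h2 : ∀ t, t ∈ PySem.List.dedup l ↔ t ∈ l := by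
    intro t; simpa [PySem.List.dedup] using PySem.Set.mem_ofList (xs := l) (y := t)
  have hperm : s.Perm (PySem.List.dedup l) :=
    (List.perm_ext_iff_of_nodup hn h1).2 (fun a => (hm a).trans (h2 a).symm)
  simpa [distinctN] using hperm.length_eq

lemma get?_erase_of_ne {ν : Type} (d : PySem.Dict Int ν) (x t : Int) (h : t ≠ x) :
    (d.erase x).get? t = d.get? t := by
  rcases d with ⟨items⟩
  simp only [PySem.Dict.erase, PySem.Dict.get?, List.find?_filter]
  congr 1
  have hpred : (fun (a : Int × ν) => decide ((!(a.1 == x)) = true ∧ (a.1 == t) = true)) =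
      (fun (p : Int × ν) => p.1 == t) := by
    funext a
    by_cases ha : a.1 = t
    · simp [ha, h]
    · simp [ha]
  rw [hpred]

lemma keys_erase {ν : Type} (d : PySem.Dict Int ν) (x : Int) :
    (d.erase x).keys = d.keys.filter (fun t => !(t == x)) := by
  rcases d with ⟨items⟩
  simp only [PySem.Dict.erase, PySem.Dict.keys]
  induction items with
  | nil => rfl
  | cons p rest ih =>
    by_cases hp : p.1 = x
    · simp [List.filter_cons, hp, ih]
    · simp [List.filter_cons, hp, ih]

lemma A_loop : ∀ (l : List Int) (ans : Int) (dic : PySem.Dict Int Int) (st : PySem.Set Int),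
    dic.keys.Nodup → (∀ t, dic.getD t 0 = (l.count t : Int)) → (∀ t, t ∈ dic.keys ↔ t ∈ l) →
    (l.foldl solutionBodyA (ans, dic, st)).1 = ans + splitCount st l := by
  intro l
  induction l with
  | nil => intro ans dic st _ _ _; simp [splitCount]
  | cons x xs ih =>
    intro ans dic st hnd hcnt hmem
    have hx : x ∈ dic.keys := (hmem x).2 (by simp)
    have hcontains : dic.contains x = true := (PySem.Dict.contains_iff_mem_keys dic x).2 hx
    -- the dict after dic[t] -= 1
    set dic1 := dic.modify x 0 (fun v => v - 1) with hdic1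
    have hgd1x : dic1.getD x 0 = (xs.count x : Int) := by
      rw [hdic1, PySem.Dict.getD_modify_self, hcnt x, List.count_cons_self]
      push_cast
      ring
    have hgd1 : ∀ t, dic1.getD t 0 = (xs.count t : Int) := by
      intro t
      by_cases hteq : t = x
      · subst hteq; exact hgd1x
      · rw [hdic1, PySem.Dict.getD_modify_of_ne dic 0 (fun v => v - 1) hteq, hcnt t,
          List.count_cons_of_ne (Ne.symm hteq)]
    have hkeys1 : dic1.keys = dic.keys := by
      rw [hdic1]
      show (dic.insert x _).keys = dic.keys
      exact PySem.Dict.keys_insert_of_contains dic _ hcontains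
    -- the dict after the possible pop
    set dic2 := if dic1.getD x 0 == 0 then dic1.erase x else dic1 with hdic2
    have hmem2 : ∀ t, t ∈ dic2.keys ↔ t ∈ xs := by
      intro t
      by_cases hz : xs.count x = 0
      · have hxnot : x ∉ xs := List.count_eq_zero.1 hz
        have hif : (dic1.getD x 0 == 0) = true := by rw [hgd1x, hz]; simp
        rw [hdic2, if_pos hif, keys_erase, List.mem_filter, hkeys1]
        constructor
        · rintro ⟨hmt, hne⟩
          have hne' : t ≠ x := by simpa using hne
          rcases List.mem_cons.mp ((hmem t).1 hmt) with h | h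
          · exact absurd h hne'
          · exact h
        · intro ht
          refine ⟨(hmem t).2 (List.mem_cons_of_mem _ ht), ?_⟩
          have hne' : t ≠ x := fun heq => hxnot (heq ▸ ht)
          simpa using hne'
      · have hxs : x ∈ xs := List.count_pos_iff.mp (Nat.pos_of_ne_zero hz)
        have hif : (dic1.getD x 0 == 0) = false := by
          rw [hgd1x]
          simp only [beq_eq_false_iff_ne, ne_eq, Int.natCast_eq_zero]
          exact hz
        rw [hdic2, hif]
        simp only [Bool.false_eq_true, if_false, hkeys1]
        constructor
        · intro hmt
          rcases List.mem_cons.mp ((hmem t).1 hmt) with h | h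
          · exact h ▸ hxs
          · exact h
        · intro ht; exact (hmem t).2 (List.mem_cons_of_mem _ ht)
    have hnd1 : dic1.keys.Nodup := hkeys1 ▸ hnd
    have hnd2 : dic2.keys.Nodup := by
      rw [hdic2]
      split
      · rw [keys_erase]; exact hnd1.filter _
      · exact hnd1
    have hgd2 : ∀ t, dic2.getD t 0 = (xs.count t : Int) := by
      intro t
      rw [hdic2]
      split
      · rename_i hif
        by_cases hteq : t = x
        · subst hteq
          have hz : xs.count t = 0 := by
            have h0 : dic1.getD t 0 = 0 := by
              have := (beq_iff_eq).1 hif; exact this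
            rw [hgd1x] at h0
            exact_mod_cast h0
          have hnotmem : t ∉ (dic1.erase t).keys := by
            rw [keys_erase, List.mem_filter]
            rintro ⟨-, hne⟩
            simp at hne
          have hnone : (dic1.erase t).get? t = none :=
            (PySem.Dict.get?_eq_none_iff_not_mem_keys _ _).2 hnotmem
          rw [PySem.Dict.getD_eq_get?_getD, hnone, hz]
          rfl
        · rw [PySem.Dict.getD_eq_get?_getD, get?_erase_of_ne _ _ _ hteq,
            ← PySem.Dict.getD_eq_get?_getD, hgd1 t]
      · exact hgd1 t
    -- size of dic2 = distinct count of xs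
    have hsize2 : dic2.size = distinctN xs := by
      have hlen : dic2.keys.length = dic2.size := by
        rcases dic2 with ⟨items⟩; simp [PySem.Dict.keys, PySem.Dict.size]
      rw [← hlen]
      exact len_eq_distinct hnd2 hmem2
    -- unfold one loop step
    rw [List.foldl_cons]
    have hbody : solutionBodyA (ans, dic, st) x =
        ((if (st.add x).length = distinctN xs then ans + 1 else ans), dic2, st.add x) := by
      show ((if PySem.Set.len (st.add x) == (dic2.size : Int) then ans + 1 else ans), dic2, st.add x) =
        ((if (st.add x).length = distinctN xs then ans + 1 else ans), dic2, st.add x)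
      rw [hsize2]
      simp only [PySem.Set.len, beq_iff_eq, Nat.cast_inj]
    rw [hbody, ih _ dic2 (st.add x) hnd2 hgd2 hmem2]
    simp only [splitCount]
    by_cases hc : (st.add x).length = distinctN xs <;> simp [hc] <;> ring

-- the suffix list B computes: distinct counts of all suffixes, ending with [0]
def suffixList : List Int → List Int
  | [] => [0]
  | x :: xs => (distinctN (x :: xs) : Int) :: suffixList xs

lemma suffixList_head : ∀ l : List Int, suffixList l = (distinctN l : Int) :: (suffixList l).drop 1 := by
  intro l
  cases l with
  | nil => decide
  | cons x xs => rfl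

-- the foldr pass produces exactly suffixList, with 'seen' a Nodup set of l's members
lemma B_foldr : ∀ l : List Int,
    (l.foldr solutionStepB ([0], PySem.Set.empty)).1 = suffixList l ∧
    (l.foldr solutionStepB ([0], PySem.Set.empty)).2.Nodup ∧
    (∀ t, t ∈ (l.foldr solutionStepB ([0], PySem.Set.empty)).2 ↔ t ∈ l) := by
  intro l
  induction l with
  | nil =>
    refine ⟨rfl, by simp [PySem.Set.empty], by simp [PySem.Set.empty]⟩
  | cons x xs ih =>
    obtain ⟨ih1, ih2, ih3⟩ := ih
    have hfold : (x :: xs).foldr solutionStepB ([0], PySem.Set.empty) =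
        solutionStepB x (xs.foldr solutionStepB ([0], PySem.Set.empty)) := by simp
    set p := xs.foldr solutionStepB ([0], PySem.Set.empty) with hp
    have hnd' : (p.2.add x).Nodup := PySem.Set.nodup_add p.2 x ih2
    have hmem' : ∀ t, t ∈ p.2.add x ↔ t ∈ x :: xs := by
      intro t
      rw [PySem.Set.mem_add, ih3 t]
      simp [or_comm]
    refine ⟨?_, by rw [hfold]; simpa [solutionStepB] using hnd', ?_⟩
    · rw [hfold]
      simp only [solutionStepB, suffixList, ← ih1]
      congr 1
      simp only [PySem.Set.len]
      rw [len_eq_distinct hnd' hmem']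
    · intro t; rw [hfold]; simpa [solutionStepB] using hmem' t

lemma B_loop : ∀ (l : List Int) (ans : Int) (pre : PySem.Set Int),
    ((l.zip ((suffixList l).drop 1)).foldl solutionBodyB (ans, pre)).1 = ans + splitCount pre l := by
  intro l
  induction l with
  | nil => intro ans pre; simp [splitCount]
  | cons x xs ih =>
    intro ans pre
    have hz : (x :: xs).zip ((suffixList (x :: xs)).drop 1) =
        (x, (distinctN xs : Int)) :: xs.zip ((suffixList xs).drop 1) := by
      conv_lhs => rw [suffixList, List.drop_one, List.tail_cons, suffixList_head xs]
      rfl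
    rw [hz]
    have hbody : solutionBodyB (ans, pre) (x, (distinctN xs : Int)) =
        ((if (pre.add x).length = distinctN xs then ans + 1 else ans), pre.add x) := by
      simp only [solutionBodyB, PySem.Set.len]
      by_cases hc : (pre.add x).length = distinctN xs
      · simp [hc]
      · have : ¬ (((pre.add x).length : Int) == (distinctN xs : Int)) = true := by
          simp; omega
        simp [hc, this]
    rw [List.foldl_cons, hbody, ih]
    simp [splitCount]
    by_cases hc : (pre.add x).length = distinctN xs <;> simp [hc] <;> ring

lemma solution_eq_splitCount (topping : List Int) :
    solution topping = splitCount PySem.Set.empty topping := by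
  unfold solution
  have h := A_loop topping 0 (PySem.Dict.counter topping) PySem.Set.empty
    (PySem.Dict.nodup_keys_counter topping)
    (fun t => PySem.Dict.getD_counter topping t)
    (fun t => by
      rw [PySem.Dict.keys_counter]
      exact PySem.Set.mem_ofList topping t)
  simpa using h

lemma solution_alt_eq_splitCount (topping : List Int) :
    solution_alt topping = splitCount PySem.Set.empty topping := by
  unfold solution_alt
  rw [(B_foldr topping).1]
  simpa using B_loop topping 0 PySem.Set.empty

-- ===== VERDICT (by name: the statement is the Claim_ definition above) =====
theorem solution_spec : Claim_equal_solution := by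
  intro topping _
  unfold Spec_solution
  rw [solution_eq_splitCount, solution_alt_eq_splitCount]
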